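-- pv_equiv track=rewrite | github.com/tjarross/AdventOfCode | 2023/01/j01_2.py | get_occurrence
-- ===== SOURCE A (Python) =====
-- def get_occurrence(string, digits):
--     for i, _ in enumerate(string):
--         for digit, digit_name in enumerate(digits):
--             try:
--                 if string.index(str(digit)) == i:
--                     return digit
--             except:
--                 pass
--             try:
--                 if string.index(digit_name) == i:
--                     return digit
--             except:
--                 pass
--     return 0
-- ===== SOURCE B (Python) =====
-- def get_occurrence(string, digits):
--     # Collect the first-occurrence position of every pattern (numeral str(d) or name),
--     # take the earliest one, then report the first digit whose numeral or name sits there.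
--     positions = []
--     for d, name in enumerate(digits):
--         p = string.find(str(d))
--         if p != -1:
--             positions.append(p)
--         q = string.find(name)
--         if q != -1:
--             positions.append(q)
--     if not positions:
--         return 0
--     first = min(positions)
--     for d, name in enumerate(digits):
--         if string.find(str(d)) == first or string.find(name) == first:
--             return d
--     return 0
-- ===== Notes on version B (the rewrite author's own statement) =====
-- stated objective: faster
-- what changed: A rescans the whole string at every position in a nested position-by-digit loop (string.index per pair); B computes each pattern's first occurrence once, takes the minimum position, and returns the first digit whose numeral or name occurs there - the outer scan over positions disappears.
-- outside the precondition, e.g. on get_occurrence('', ['x', '']): A returns 0, B returns 1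
import Mathlib
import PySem

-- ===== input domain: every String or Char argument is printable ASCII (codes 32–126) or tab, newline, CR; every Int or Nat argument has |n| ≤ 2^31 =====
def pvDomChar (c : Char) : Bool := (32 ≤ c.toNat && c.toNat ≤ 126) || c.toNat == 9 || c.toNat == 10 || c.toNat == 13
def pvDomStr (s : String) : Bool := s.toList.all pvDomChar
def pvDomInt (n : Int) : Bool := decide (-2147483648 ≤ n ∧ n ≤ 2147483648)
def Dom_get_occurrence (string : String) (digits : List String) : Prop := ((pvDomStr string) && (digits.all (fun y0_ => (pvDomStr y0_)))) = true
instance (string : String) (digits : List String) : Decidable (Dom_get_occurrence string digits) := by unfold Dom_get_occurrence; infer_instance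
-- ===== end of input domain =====

-- B replaces A's nested position-by-digit scan (string.index per pair) by one pass computing each
-- pattern's first occurrence, taking the minimum position, and one pass picking the first digit there (faster).


-- ===== PORT A =====
-- inner loop 'for digit, digit_name in enumerate(digits)'; `string.index(p) == i` under
-- 'try/except: pass' is exactly `PySem.Str.find string p = i` here, since index raises
-- precisely when find = -1 and the probed i (an enumerate index) is never -1.
def goInnerA (string : String) (i : Int) (digit : Int) : List String → Option Int
  | [] => none
  | digit_name :: rest =>
    if PySem.Str.find string (PySem.Int.toStr digit) = i then some digit
    else if PySem.Str.find string digit_name = i then some digit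
    else goInnerA string i (digit + 1) rest

-- outer loop 'for i, _ in enumerate(string)'; falls off the end to 'return 0'
def goOuterA (string : String) (digits : List String) : List Nat → Int
  | [] => 0
  | i :: is =>
    match goInnerA string (i : Int) 0 digits with
    | some d => d
    | none => goOuterA string digits is

def get_occurrence (string : String) (digits : List String) : Int :=
  goOuterA string digits (List.range string.toList.length)

-- ===== PORT B =====
-- first pass: collect the first-occurrence position of every pattern that occurs
def positionsB (string : String) (d : Int) : List String → List Int
  | [] => []
  | name :: rest =>
    (if PySem.Str.find string (PySem.Int.toStr d) ≠ -1 then [PySem.Str.find string (PySem.Int.toStr d)] else []) ++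
    (if PySem.Str.find string name ≠ -1 then [PySem.Str.find string name] else []) ++
    positionsB string (d + 1) rest

-- second pass: first digit whose numeral or name sits at the minimal position
def findFirstB (string : String) (first : Int) (d : Int) : List String → Int
  | [] => 0
  | name :: rest =>
    if PySem.Str.find string (PySem.Int.toStr d) = first ∨ PySem.Str.find string name = first
    then d
    else findFirstB string first (d + 1) rest

def get_occurrence_alt (string : String) (digits : List String) : Int :=
  match PySem.List.min? (positionsB string 0 digits) (fun x => x) with
  | none => 0
  | some first => findFirstB string first 0 digits

-- ===== PRECONDITION & SPEC =====
-- Pre_ excludes only the degenerate corner where the string is empty and digits contains an empty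
-- name: there A's scan over positions never runs (it returns 0) while the empty pattern "occurs"
-- at position 0, an unspecified corner where B reports that digit; both values are defensible.
-- (stated on .toList so that 'decide' evaluates it on literals)
def Pre_get_occurrence (string : String) (digits : List String) : Prop :=
  string.toList = [] → ∀ nm ∈ digits, nm.toList ≠ []
instance (string : String) (digits : List String) : Decidable (Pre_get_occurrence string digits) := by
  unfold Pre_get_occurrence; infer_instance

def pvWitness_get_occurrence : String × List String := ("a1", ["zero", "one"])

def Spec_get_occurrence (string : String) (digits : List String) (out : Int) : Prop := out = get_occurrence_alt string digits
instance (string : String) (digits : List String) (out : Int) : Decidable (Spec_get_occurrence string digits out) := by unfold Spec_get_occurrence; infer_instance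

-- ===== CLAIM (what is proved, stated in full; the proofs are below) =====
def Claim_equal_get_occurrence : Prop := ∀ (string : String) (digits : List String), Dom_get_occurrence string digits → Pre_get_occurrence string digits → Spec_get_occurrence string digits (get_occurrence string digits)

-- ===== LEMMAS AND PROOFS =====

theorem toChars_ne_nil (n : Int) : PySem.Int.toChars n ≠ [] := by
  unfold PySem.Int.toChars
  split
  · simp
  · have hlen : 0 < (Nat.toDigits 10 n.toNat).length := Nat.length_toDigits_pos
    intro h; simp [h] at hlen

-- every collected position is the find of some pattern: a member of the digits list or some numeral
theorem mem_positionsB {s : String} {x : Int} (d : Int) (l : List String)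
    (hx : x ∈ positionsB s d l) :
    x ≠ -1 ∧ ∃ pat : String, PySem.Str.find s pat = x ∧
      (pat ∈ l ∨ ∃ k : Int, pat = PySem.Int.toStr k) := by
  induction l generalizing d with
  | nil => simp [positionsB] at hx
  | cons name rest ih =>
    simp only [positionsB, List.mem_append] at hx
    rcases hx with (h | h) | h
    · split_ifs at h with hp
      · simp only [List.mem_singleton] at h
        exact ⟨h ▸ hp, PySem.Int.toStr d, h.symm, Or.inr ⟨d, rfl⟩⟩
      · simp at h
    · split_ifs at h with hq
      · simp only [List.mem_singleton] at h
        exact ⟨h ▸ hq, name, h.symm, Or.inl (List.mem_cons_self)⟩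
      · simp at h
    · obtain ⟨h1, pat, h2, h3⟩ := ih (d + 1) h
      refine ⟨h1, pat, h2, ?_⟩
      rcases h3 with h3 | h3
      · exact Or.inl (List.mem_cons_of_mem _ h3)
      · exact Or.inr h3

-- if the inner loop fires at probe i, then i is one of the collected positions (or i = -1)
theorem goInnerA_mem {s : String} {i : Int} {r : Int} (d : Int) (l : List String)
    (h : goInnerA s i d l = some r) : i ∈ positionsB s d l ∨ i = -1 := by
  induction l generalizing d with
  | nil => simp [goInnerA] at h
  | cons name rest ih =>
    simp only [goInnerA] at h
    simp only [positionsB, List.mem_append]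
    split_ifs at h with h1 h2
    · by_cases hi : i = -1
      · exact Or.inr hi
      · refine Or.inl (Or.inl (Or.inl ?_))
        have hp : PySem.Str.find s (PySem.Int.toStr d) ≠ -1 := by rw [h1]; exact hi
        rw [if_pos hp]
        exact List.mem_singleton.mpr h1.symm
    · by_cases hi : i = -1
      · exact Or.inr hi
      · refine Or.inl (Or.inl (Or.inr ?_))
        have hq : PySem.Str.find s name ≠ -1 := by rw [h2]; exact hi
        rw [if_pos hq]
        exact List.mem_singleton.mpr h2.symm
    · rcases ih (d + 1) h with h' | h'
      · exact Or.inl (Or.inr h')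
      · exact Or.inr h'

-- at a collected position the inner loop fires and returns exactly B's second-pass pick
theorem goInnerA_of_hit {s : String} {first : Int} (d : Int) (l : List String)
    (hmem : first ∈ positionsB s d l) :
    goInnerA s first d l = some (findFirstB s first d l) := by
  induction l generalizing d with
  | nil => simp [positionsB] at hmem
  | cons name rest ih =>
    simp only [goInnerA, findFirstB]
    by_cases h1 : PySem.Str.find s (PySem.Int.toStr d) = first
    · rw [if_pos h1, if_pos (Or.inl h1)]
    · by_cases h2 : PySem.Str.find s name = first
      · rw [if_neg h1, if_pos h2, if_pos (Or.inr h2)]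
      · rw [if_neg h1, if_neg h2, if_neg (by tauto : ¬ (PySem.Str.find s (PySem.Int.toStr d) = first ∨ PySem.Str.find s name = first))]
        apply ih
        simp only [positionsB, List.mem_append] at hmem
        rcases hmem with (h | h) | h
        · split_ifs at h with hp
          · rw [List.mem_singleton] at h
            exact absurd h.symm h1
          · exact absurd h List.not_mem_nil
        · split_ifs at h with hq
          · rw [List.mem_singleton] at h
            exact absurd h.symm h2
          · exact absurd h List.not_mem_nil
        · exact h

-- outer loop: positions whose inner loop misses are skipped
theorem goOuterA_append_none {s : String} {L : List String} (is1 is2 : List Nat)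
    (h : ∀ i ∈ is1, goInnerA s (i : Int) 0 L = none) :
    goOuterA s L (is1 ++ is2) = goOuterA s L is2 := by
  induction is1 with
  | nil => rfl
  | cons i is ih =>
    simp only [List.cons_append, goOuterA, h i List.mem_cons_self]
    exact ih (fun j hj => h j (List.mem_cons_of_mem _ hj))

theorem goOuterA_none {s : String} {L : List String} (is : List Nat)
    (h : ∀ i ∈ is, goInnerA s (i : Int) 0 L = none) :
    goOuterA s L is = 0 := by
  have := goOuterA_append_none is [] h
  simpa using this

-- under Pre_, every collected position is a genuine character index of the string
theorem positionsB_bounds {s : String} {L : List String} {x : Int}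
    (hpre : Pre_get_occurrence s L) (hx : x ∈ positionsB s 0 L) :
    0 ≤ x ∧ x < (s.toList.length : Int) := by
  obtain ⟨hne, pat, hfind, hpat⟩ := mem_positionsB 0 L hx
  rw [PySem.Str.find_eq] at hfind
  have hnn : 0 ≤ x := by
    rw [← hfind, PySem.Chars.find_nonneg_iff]
    rw [← hfind, Ne, PySem.Chars.find_eq_neg_one_iff, not_not] at hne
    exact hne
  have hle : x ≤ (s.toList.length : Int) := hfind ▸ PySem.Chars.find_le_length _ _
  refine ⟨hnn, lt_of_le_of_ne hle ?_⟩
  intro heq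
  -- if the first occurrence were at the very end, the pattern would be empty
  have hspec := PySem.Chars.find_spec (s := s.toList) (sub := pat.toList) (by rw [hfind]; exact hnn)
  have hdrop : s.toList.drop (PySem.Chars.find s.toList pat.toList).toNat = [] := by
    rw [hfind, heq]
    simp
  rw [hdrop] at hspec
  have hpatnil : pat.toList = [] := List.prefix_nil.mp hspec.1
  rcases hpat with hmem | ⟨k, hk⟩
  · -- pat = "" ∈ digits; find s "" = 0 = length, so s = "" too, contradicting Pre_
    have h0 : PySem.Chars.find s.toList pat.toList = 0 := by
      rw [hpatnil]; exact PySem.Chars.find_nil _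
    have hslen : s.toList.length = 0 := by
      rw [hfind, heq] at h0
      exact_mod_cast h0
    exact hpre (List.eq_nil_of_length_eq_zero hslen) pat hmem hpatnil
  · -- pat is a numeral str(k), which is never empty
    have : (PySem.Int.toStr k).toList = [] := hk ▸ hpatnil
    rw [PySem.Int.toList_toStr] at this
    exact toChars_ne_nil k this

-- ===== VERDICT (by name: the statement is the Claim_ definition above) =====
theorem get_occurrence_spec : Claim_equal_get_occurrence := by
  unfold Claim_equal_get_occurrence
  intro s L _hdom hpre
  unfold Spec_get_occurrence get_occurrence get_occurrence_alt
  cases hmin : PySem.List.min? (positionsB s 0 L) (fun x => x) with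
  | none =>
    -- no pattern occurs at all: A's inner loop never fires
    have hempty : positionsB s 0 L = [] := (PySem.List.min?_eq_none_iff _ _).mp hmin
    apply goOuterA_none
    intro i _hi
    cases hg : goInnerA s (i : Int) 0 L with
    | none => rfl
    | some r =>
      rcases goInnerA_mem 0 L hg with hm | hm
      · rw [hempty] at hm; simp at hm
      · omega
  | some first =>
    have hmem := PySem.List.min?_mem hmin
    have hmin' := PySem.List.min?_isMin hmin
    obtain ⟨hnn, hlt⟩ := positionsB_bounds hpre hmem
    -- split the range at first.toNat
    have hsplit : List.range s.toList.length =
        List.range' 0 first.toNat ++ List.range' first.toNat (s.toList.length - first.toNat) := by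
      rw [List.range_eq_range']
      have h2 := List.range'_append (s := 0) (m := first.toNat) (n := s.toList.length - first.toNat) (step := 1)
      simp only [Nat.one_mul, Nat.zero_add] at h2
      rw [Nat.add_sub_cancel' (by omega : first.toNat ≤ s.toList.length)] at h2
      exact h2.symm
    rw [hsplit, goOuterA_append_none]
    · -- the block starting at first.toNat begins with a hit
      have hpos : s.toList.length - first.toNat = (s.toList.length - first.toNat - 1) + 1 := by omega
      rw [hpos, List.range'_succ, goOuterA]
      have hcast : ((first.toNat : Nat) : Int) = first := Int.toNat_of_nonneg hnn
      rw [hcast, goInnerA_of_hit 0 L hmem]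
    · -- every earlier position misses
      intro i hi
      rw [List.mem_range'_1] at hi
      cases hg : goInnerA s (i : Int) 0 L with
      | none => rfl
      | some r =>
        rcases goInnerA_mem 0 L hg with hm | hm
        · have := hmin' _ hm
          simp only at this
          omega
        · omega
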